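-- pv_equiv track=rewrite | github.com/henrytwo/RahCraft | SERVER/server.py | give_item
-- ===== SOURCE A (Python) =====
-- def give_item(inventory, hotbar, Nitem, quantity):
--     item_location = ''  # used to store the first location where the item can be stored
--     inventory_type = ''  # This is used to store the first open slot type (inventory or hotbar)
--     for item in range(len(hotbar)):  # Loop through the hotbar first because the hotbar takes priority
--         if hotbar[item][1] < 64:  # If stacking is possible, stack item and quit
--             hotbar[item][1] += quantity
--             return inventory, hotbar
--         elif hotbar[item][0] == 0 and inventory_type == '':  # If an open space is found, store the cords and type for later use if not valid stacking spot is found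
--             item_location = item
--             inventory_type = 'hotbar'
--
--     for row in range(len(inventory)):  # Same as above but searches through the inventory instead
--         for item in range(len(inventory[row])):
--             if inventory[row][item][0] == Nitem and inventory[row][item][1] < 64:
--                 inventory[row][item][1] += quantity
--                 return inventory, hotbar
--             elif inventory[row][item][0] == 0 and inventory_type == '':
--                 item_location = [row, item]
--                 inventory_type = 'inventory'
--
--     if inventory_type == 'hotbar':  # If no place to stack te inventory is found, place the item(s) in the first open slot found
--         hotbar[item_location] = [Nitem, quantity]
--     elif inventory_type == 'inventory':
--         inventory[item_location[0]][item_location[1]] = [Nitem, quantity]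
--
--     return inventory, hotbar
-- ===== SOURCE B (Python) =====
-- def give_item(inventory, hotbar, Nitem, quantity):
--     # Two-phase, non-mutating rewrite: phase 1 returns a fresh structure with the
--     # first stackable slot bumped (hotbar: any slot with count < 64; inventory:
--     # only a slot already holding Nitem with count < 64); phase 2 places
--     # [Nitem, quantity] into the first empty slot (id == 0), hotbar first.
--     # NOTE: unlike A, B does not mutate its arguments; equivalence is about the
--     # returned value only.
--     def bump(slot):
--         return slot[:1] + [slot[1] + quantity] + slot[2:]
--
--     # phase 1: stacking
--     for i, slot in enumerate(hotbar):
--         if slot[1] < 64: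
--             return inventory, hotbar[:i] + [bump(slot)] + hotbar[i + 1:]
--     for r, row in enumerate(inventory):
--         for c, slot in enumerate(row):
--             if slot[0] == Nitem and slot[1] < 64:
--                 return (inventory[:r] + [row[:c] + [bump(slot)] + row[c + 1:]] + inventory[r + 1:],
--                         hotbar)
--
--     # phase 2: first empty slot
--     for i, slot in enumerate(hotbar):
--         if slot[0] == 0:
--             return inventory, hotbar[:i] + [[Nitem, quantity]] + hotbar[i + 1:]
--     for r, row in enumerate(inventory):
--         for c, slot in enumerate(row):
--             if slot[0] == 0:
--                 return (inventory[:r] + [row[:c] + [[Nitem, quantity]] + row[c + 1:]] + inventory[r + 1:],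
--                         hotbar)
--
--     return inventory, hotbar
-- ===== Notes on version B (the rewrite author's own statement) =====
-- stated objective: alternative
-- what changed: Replaces A's single combined pass with recorded-fallback-location state by a non-mutating two-phase algorithm: phase 1 scans hotbar-then-inventory for a stackable slot and rebuilds the structure with that slot bumped, phase 2 rescans for the first empty slot (id==0) and places [Nitem, quantity] there.
import Mathlib
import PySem

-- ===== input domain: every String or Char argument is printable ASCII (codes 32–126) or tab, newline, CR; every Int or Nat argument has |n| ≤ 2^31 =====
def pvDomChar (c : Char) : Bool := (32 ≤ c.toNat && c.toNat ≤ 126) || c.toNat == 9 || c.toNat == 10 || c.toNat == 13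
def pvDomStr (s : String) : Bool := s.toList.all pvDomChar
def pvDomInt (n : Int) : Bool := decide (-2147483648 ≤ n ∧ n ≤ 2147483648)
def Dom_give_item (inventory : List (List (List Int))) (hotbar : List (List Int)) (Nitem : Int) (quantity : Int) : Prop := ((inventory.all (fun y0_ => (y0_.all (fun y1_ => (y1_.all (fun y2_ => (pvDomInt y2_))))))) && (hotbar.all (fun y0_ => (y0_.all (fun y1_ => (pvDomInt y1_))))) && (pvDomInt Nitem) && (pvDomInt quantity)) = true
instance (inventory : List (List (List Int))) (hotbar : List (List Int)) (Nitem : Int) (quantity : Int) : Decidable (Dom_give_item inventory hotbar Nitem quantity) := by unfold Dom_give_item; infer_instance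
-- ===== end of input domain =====

-- B is a non-mutating two-phase rewrite (stack pass, then place-in-empty pass) of A's
-- one-pass search with recorded fallback location; A mutates its arguments in place and
-- B does not — the equivalence proved here is about the RETURN value only.

-- ===== PORT A =====
-- hotbar loop of A: returns the stacked hotbar (early return) or the recorded first
-- open-slot index ('' / item in Python, here Option Nat)
def hbLoopA (hb : List (List Int)) (quantity : Int) : Sum (List (List Int)) (Option Nat) :=
  match hb with
  | [] => .inr none
  | s :: rest =>
    if s.getD 1 0 < 64 then .inl (s.set 1 (s.getD 1 0 + quantity) :: rest)
    else
      match hbLoopA rest quantity with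
      | .inl hb' => .inl (s :: hb')
      | .inr r => .inr (if s.getD 0 0 = 0 then some 0 else r.map (· + 1))

-- inner inventory-row loop of A
def rowLoopA (row : List (List Int)) (Nitem quantity : Int) : Sum (List (List Int)) (Option Nat) :=
  match row with
  | [] => .inr none
  | s :: rest =>
    if s.getD 0 0 = Nitem ∧ s.getD 1 0 < 64 then .inl (s.set 1 (s.getD 1 0 + quantity) :: rest)
    else
      match rowLoopA rest Nitem quantity with
      | .inl row' => .inl (s :: row')
      | .inr r => .inr (if s.getD 0 0 = 0 then some 0 else r.map (· + 1))

-- outer inventory loop of A ([row, item] recorded as a pair)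
def invLoopA (inv : List (List (List Int))) (Nitem quantity : Int) : Sum (List (List (List Int))) (Option (Nat × Nat)) :=
  match inv with
  | [] => .inr none
  | row :: rest =>
    match rowLoopA row Nitem quantity with
    | .inl row' => .inl (row' :: rest)
    | .inr r0 =>
      match invLoopA rest Nitem quantity with
      | .inl inv' => .inl (row :: inv')
      | .inr r =>
        .inr (match r0 with
              | some j => some (0, j)
              | none => r.map (fun p => (p.1 + 1, p.2)))

def give_item (inventory : List (List (List Int))) (hotbar : List (List Int)) (Nitem : Int) (quantity : Int) : List (List (List Int)) × List (List Int) :=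
  match hbLoopA hotbar quantity with
  | .inl hb' => (inventory, hb')
  | .inr hrec =>
    match invLoopA inventory Nitem quantity with
    | .inl inv' => (inv', hotbar)
    | .inr irec =>
      match hrec with
      | some i => (inventory, hotbar.set i [Nitem, quantity])
      | none =>
        match irec with
        | some (r, c) => (inventory.set r ((inventory.getD r []).set c [Nitem, quantity]), hotbar)
        | none => (inventory, hotbar)

-- ===== PORT B =====
-- slot[:1] + [slot[1] + quantity] + slot[2:]
def bumpB (slot : List Int) (quantity : Int) : List Int :=
  slot.take 1 ++ [slot.getD 1 0 + quantity] ++ slot.drop 2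

-- phase 1 over the hotbar: first slot with count < 64 gets bumped
def stackHB (hb : List (List Int)) (quantity : Int) : Option (List (List Int)) :=
  match hb with
  | [] => none
  | s :: rest =>
    if s.getD 1 0 < 64 then some (bumpB s quantity :: rest)
    else (stackHB rest quantity).map (s :: ·)

-- phase 1 over one inventory row: first slot holding Nitem with count < 64 gets bumped
def stackRow (row : List (List Int)) (Nitem quantity : Int) : Option (List (List Int)) :=
  match row with
  | [] => none
  | s :: rest =>
    if s.getD 0 0 = Nitem ∧ s.getD 1 0 < 64 then some (bumpB s quantity :: rest)
    else (stackRow rest Nitem quantity).map (s :: ·)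

def stackInv (inv : List (List (List Int))) (Nitem quantity : Int) : Option (List (List (List Int))) :=
  match inv with
  | [] => none
  | row :: rest =>
    match stackRow row Nitem quantity with
    | some row' => some (row' :: rest)
    | none => (stackInv rest Nitem quantity).map (row :: ·)

-- phase 2: first empty slot (id == 0) receives [Nitem, quantity]
def placeHB (hb : List (List Int)) (Nitem quantity : Int) : Option (List (List Int)) :=
  match hb with
  | [] => none
  | s :: rest =>
    if s.getD 0 0 = 0 then some ([Nitem, quantity] :: rest)
    else (placeHB rest Nitem quantity).map (s :: ·)

def placeRow (row : List (List Int)) (Nitem quantity : Int) : Option (List (List Int)) :=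
  match row with
  | [] => none
  | s :: rest =>
    if s.getD 0 0 = 0 then some ([Nitem, quantity] :: rest)
    else (placeRow rest Nitem quantity).map (s :: ·)

def placeInv (inv : List (List (List Int))) (Nitem quantity : Int) : Option (List (List (List Int))) :=
  match inv with
  | [] => none
  | row :: rest =>
    match placeRow row Nitem quantity with
    | some row' => some (row' :: rest)
    | none => (placeInv rest Nitem quantity).map (row :: ·)

def give_item_alt (inventory : List (List (List Int))) (hotbar : List (List Int)) (Nitem : Int) (quantity : Int) : List (List (List Int)) × List (List Int) :=
  match stackHB hotbar quantity with
  | some hb' => (inventory, hb')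
  | none =>
    match stackInv inventory Nitem quantity with
    | some inv' => (inv', hotbar)
    | none =>
      match placeHB hotbar Nitem quantity with
      | some hb' => (inventory, hb')
      | none =>
        match placeInv inventory Nitem quantity with
        | some inv' => (inv', hotbar)
        | none => (inventory, hotbar)

-- ===== PRECONDITION & SPEC =====
-- Pre_ = exactly the inputs on which A returns normally: every slot A's scan reads before
-- (and at) the first stacking opportunity is long enough for the reads A performs there;
-- on any other input A raises IndexError on a slot shorter than 2 (or 1) elements.
def Pre_give_item (inventory : List (List (List Int))) (hotbar : List (List Int)) (Nitem : Int) (quantity : Int) : Prop :=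
  (∀ s ∈ hotbar.takeWhile (fun t => !decide (2 ≤ t.length ∧ t.getD 1 0 < 64)), 2 ≤ s.length) ∧
  ((∃ s ∈ hotbar, 2 ≤ s.length ∧ s.getD 1 0 < 64) ∨
   (∀ s ∈ inventory.flatten.takeWhile
        (fun t => !decide (2 ≤ t.length ∧ t.getD 0 0 = Nitem ∧ t.getD 1 0 < 64)),
      1 ≤ s.length ∧ (s.getD 0 0 = Nitem → 2 ≤ s.length)))
instance (inventory : List (List (List Int))) (hotbar : List (List Int)) (Nitem : Int) (quantity : Int) : Decidable (Pre_give_item inventory hotbar Nitem quantity) := by unfold Pre_give_item; infer_instance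

def pvWitness_give_item : List (List (List Int)) × List (List Int) × Int × Int :=
  ([[[1, 2]]], [[3, 64]], 5, 6)

def Spec_give_item (inventory : List (List (List Int))) (hotbar : List (List Int)) (Nitem : Int) (quantity : Int) (out : List (List (List Int)) × List (List Int)) : Prop := out = give_item_alt inventory hotbar Nitem quantity
instance (inventory : List (List (List Int))) (hotbar : List (List Int)) (Nitem : Int) (quantity : Int) (out : List (List (List Int)) × List (List Int)) : Decidable (Spec_give_item inventory hotbar Nitem quantity out) := by unfold Spec_give_item; infer_instance

-- ===== CLAIM (what is proved, stated in full; the proofs are below) =====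
def Claim_equal_give_item : Prop := ∀ (inventory : List (List (List Int))) (hotbar : List (List Int)) (Nitem : Int) (quantity : Int), Dom_give_item inventory hotbar Nitem quantity → Pre_give_item inventory hotbar Nitem quantity → Spec_give_item inventory hotbar Nitem quantity (give_item inventory hotbar Nitem quantity)

-- ===== LEMMAS AND PROOFS =====

-- List.set at index 1 equals B's slice-based bump on slots of length ≥ 2
theorem set1_eq_bump (s : List Int) (h : 2 ≤ s.length) (q : Int) :
    s.set 1 (s[1]?.getD 0 + q) = bumpB s q := by
  match s with
  | [] => simp at h
  | [a] => simp at h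
  | a :: b :: t => simp [bumpB]

-- an element of a takeWhile prefix stays in the prefix after appending
theorem mem_takeWhile_append {α : Type} (p : α → Bool) (l₁ l₂ : List α) (s : α)
    (h : s ∈ l₁.takeWhile p) : s ∈ (l₁ ++ l₂).takeWhile p := by
  induction l₁ with
  | nil => simp [List.takeWhile] at h
  | cons a t ih =>
    cases hp : p a
    · simp [List.takeWhile_cons, hp] at h
    · simp [List.takeWhile_cons, hp] at h ⊢
      rcases h with h | h
      · exact Or.inl h
      · exact Or.inr (ih h)

-- takeWhile over an append whose first part satisfies the predicate everywhere
theorem takeWhile_append_all {α : Type} (p : α → Bool) (l₁ l₂ : List α)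
    (h : ∀ x ∈ l₁, p x = true) : (l₁ ++ l₂).takeWhile p = l₁ ++ l₂.takeWhile p := by
  induction l₁ with
  | nil => simp
  | cons a t ih =>
    simp [List.takeWhile_cons, h a (by simp)]
    exact ih (fun x hx => h x (by simp [hx]))

-- if A's hotbar loop falls through, no hotbar slot passed the stacking test
theorem hbLoopA_inr_nostack (q : Int) (hb : List (List Int)) :
    ∀ (r : Option Nat), hbLoopA hb q = .inr r → ∀ s ∈ hb, ¬ s[1]?.getD 0 < 64 := by
  induction hb with
  | nil => intro r _ s hs; simp at hs
  | cons a rest ih =>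
    intro r h s hs
    by_cases hc : a[1]?.getD 0 < 64
    · simp [hbLoopA, hc] at h
    · rcases List.mem_cons.mp hs with rfl | hs'
      · exact hc
      · cases h' : hbLoopA rest q with
        | inl hb' => simp [hbLoopA, hc, h'] at h
        | inr r' => exact ih r' h' s hs'

-- if A's row loop falls through, no slot of the row passed the stacking test
theorem rowLoopA_inr_nostack (Nitem q : Int) (row : List (List Int)) :
    ∀ (r : Option Nat), rowLoopA row Nitem q = .inr r →
      ∀ s ∈ row, ¬ (s[0]?.getD 0 = Nitem ∧ s[1]?.getD 0 < 64) := by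
  induction row with
  | nil => intro r _ s hs; simp at hs
  | cons a rest ih =>
    intro r h s hs
    by_cases hc : a[0]?.getD 0 = Nitem ∧ a[1]?.getD 0 < 64
    · simp [rowLoopA, hc] at h
    · rcases List.mem_cons.mp hs with rfl | hs'
      · exact hc
      · cases h' : rowLoopA rest Nitem q with
        | inl row' => simp [rowLoopA, hc, h'] at h
        | inr r' => exact ih r' h' s hs'

-- relation between A's hotbar loop and B's two hotbar passes
theorem hb_rel (Nitem q : Int) (hb : List (List Int))
    (h : ∀ s ∈ hb.takeWhile (fun t => !decide (2 ≤ t.length ∧ t.getD 1 0 < 64)), 2 ≤ s.length) :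
    (∃ hb', hbLoopA hb q = .inl hb' ∧ stackHB hb q = some hb') ∨
    (hbLoopA hb q = .inr none ∧ stackHB hb q = none ∧ placeHB hb Nitem q = none) ∨
    (∃ i, hbLoopA hb q = .inr (some i) ∧ stackHB hb q = none ∧
          placeHB hb Nitem q = some (hb.set i [Nitem, q])) := by
  induction hb with
  | nil => right; left; simp [hbLoopA, stackHB, placeHB]
  | cons s rest ih =>
    by_cases hc : s[1]?.getD 0 < 64
    · have hs : 2 ≤ s.length := by
        by_contra hlen
        have hp : (fun (t : List Int) => !decide (2 ≤ t.length ∧ t.getD 1 0 < 64)) s = true := by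
          simp only [Bool.not_eq_true', decide_eq_false_iff_not]
          exact fun hh => hlen hh.1
        exact hlen (h s (by rw [List.takeWhile_cons_of_pos (p := fun (t : List Int) => !decide (2 ≤ t.length ∧ t.getD 1 0 < 64)) hp]; exact List.mem_cons_self ..))
      left
      exact ⟨s.set 1 (s[1]?.getD 0 + q) :: rest, by simp [hbLoopA, hc],
             by simp [stackHB, hc, set1_eq_bump s hs q]⟩
    · have hrest := ih (fun x hx => h x (by
        have hp : (fun (t : List Int) => !decide (2 ≤ t.length ∧ t.getD 1 0 < 64)) s = true := by
          simp only [Bool.not_eq_true', decide_eq_false_iff_not]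
          exact fun hh => hc (by simpa using hh.2)
        rw [List.takeWhile_cons_of_pos (p := fun (t : List Int) => !decide (2 ≤ t.length ∧ t.getD 1 0 < 64)) hp]
        exact List.mem_cons_of_mem _ hx))
      rcases hrest with ⟨hb', h1, h2⟩ | ⟨h1, h2, h3⟩ | ⟨i, h1, h2, h3⟩
      · left; exact ⟨s :: hb', by simp [hbLoopA, hc, h1], by simp [stackHB, hc, h2]⟩
      · by_cases hz : s[0]?.getD 0 = 0
        · right; right
          exact ⟨0, by simp [hbLoopA, hc, h1, hz], by simp [stackHB, hc, h2],
                 by simp [placeHB, hz]⟩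
        · right; left
          exact ⟨by simp [hbLoopA, hc, h1, hz], by simp [stackHB, hc, h2],
                 by simp [placeHB, hz, h3]⟩
      · by_cases hz : s[0]?.getD 0 = 0
        · right; right
          exact ⟨0, by simp [hbLoopA, hc, h1, hz], by simp [stackHB, hc, h2],
                 by simp [placeHB, hz]⟩
        · right; right
          exact ⟨i + 1, by simp [hbLoopA, hc, h1, hz], by simp [stackHB, hc, h2],
                 by simp [placeHB, hz, h3]⟩

-- relation between A's inner row loop and B's two row passes
theorem row_rel (Nitem q : Int) (row : List (List Int))
    (h : ∀ s ∈ row.takeWhile (fun t => !decide (2 ≤ t.length ∧ t.getD 0 0 = Nitem ∧ t.getD 1 0 < 64)),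
           1 ≤ s.length ∧ (s.getD 0 0 = Nitem → 2 ≤ s.length)) :
    (∃ row', rowLoopA row Nitem q = .inl row' ∧ stackRow row Nitem q = some row') ∨
    (rowLoopA row Nitem q = .inr none ∧ stackRow row Nitem q = none ∧ placeRow row Nitem q = none) ∨
    (∃ j, rowLoopA row Nitem q = .inr (some j) ∧ stackRow row Nitem q = none ∧
          placeRow row Nitem q = some (row.set j [Nitem, q])) := by
  induction row with
  | nil => right; left; simp [rowLoopA, stackRow, placeRow]
  | cons s rest ih =>
    by_cases hc : s[0]?.getD 0 = Nitem ∧ s[1]?.getD 0 < 64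
    · have hs : 2 ≤ s.length := by
        by_contra hlen
        have hp : (fun (t : List Int) =>
            !decide (2 ≤ t.length ∧ t.getD 0 0 = Nitem ∧ t.getD 1 0 < 64)) s = true := by
          simp only [Bool.not_eq_true', decide_eq_false_iff_not]
          exact fun hh => hlen hh.1
        have hmem : s ∈ (s :: rest).takeWhile
            (fun t => !decide (2 ≤ t.length ∧ t.getD 0 0 = Nitem ∧ t.getD 1 0 < 64)) := by
          rw [List.takeWhile_cons_of_pos (p := fun (t : List Int) => !decide (2 ≤ t.length ∧ t.getD 0 0 = Nitem ∧ t.getD 1 0 < 64)) hp]; exact List.mem_cons_self ..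
        exact hlen ((h s hmem).2 hc.1)
      left
      exact ⟨s.set 1 (s[1]?.getD 0 + q) :: rest, by simp [rowLoopA, hc],
             by simp [stackRow, hc, set1_eq_bump s hs q]⟩
    · have hrest := ih (fun x hx => h x (by
        have hp : (fun (t : List Int) =>
            !decide (2 ≤ t.length ∧ t.getD 0 0 = Nitem ∧ t.getD 1 0 < 64)) s = true := by
          simp only [Bool.not_eq_true', decide_eq_false_iff_not]
          intro hh
          exact hc ⟨by simpa using hh.2.1, by simpa using hh.2.2⟩
        rw [List.takeWhile_cons_of_pos (p := fun (t : List Int) => !decide (2 ≤ t.length ∧ t.getD 0 0 = Nitem ∧ t.getD 1 0 < 64)) hp]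
        exact List.mem_cons_of_mem _ hx))
      rcases hrest with ⟨row', h1, h2⟩ | ⟨h1, h2, h3⟩ | ⟨j, h1, h2, h3⟩
      · left; exact ⟨s :: row', by simp [rowLoopA, hc, h1], by simp [stackRow, hc, h2]⟩
      · by_cases hz : s[0]?.getD 0 = 0
        · right; right
          exact ⟨0, by simp [rowLoopA, h1, hz]; omega, by simp [stackRow, hc, h2],
                 by simp [placeRow, hz]⟩
        · right; left
          exact ⟨by simp [rowLoopA, hc, h1, hz], by simp [stackRow, hc, h2],
                 by simp [placeRow, hz, h3]⟩
      · by_cases hz : s[0]?.getD 0 = 0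
        · right; right
          exact ⟨0, by simp [rowLoopA, h1, hz]; omega, by simp [stackRow, hc, h2],
                 by simp [placeRow, hz]⟩
        · right; right
          exact ⟨j + 1, by simp [rowLoopA, hc, h1, hz], by simp [stackRow, hc, h2],
                 by simp [placeRow, hz, h3]⟩

-- relation between A's nested inventory loop and B's two inventory passes
theorem inv_rel (Nitem q : Int) (inv : List (List (List Int)))
    (h : ∀ s ∈ inv.flatten.takeWhile
           (fun t => !decide (2 ≤ t.length ∧ t.getD 0 0 = Nitem ∧ t.getD 1 0 < 64)),
           1 ≤ s.length ∧ (s.getD 0 0 = Nitem → 2 ≤ s.length)) :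
    (∃ inv', invLoopA inv Nitem q = .inl inv' ∧ stackInv inv Nitem q = some inv') ∨
    (invLoopA inv Nitem q = .inr none ∧ stackInv inv Nitem q = none ∧ placeInv inv Nitem q = none) ∨
    (∃ r c, invLoopA inv Nitem q = .inr (some (r, c)) ∧ stackInv inv Nitem q = none ∧
            placeInv inv Nitem q = some (inv.set r ((inv.getD r []).set c [Nitem, q]))) := by
  induction inv with
  | nil => right; left; simp [invLoopA, stackInv, placeInv]
  | cons row rest ih =>
    have hrow := row_rel Nitem q row (fun s hs => h s (by
      rw [List.flatten_cons]
      exact mem_takeWhile_append _ _ _ _ hs))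
    rcases hrow with ⟨row', r1, r2⟩ | ⟨r1, r2, r3⟩ | ⟨j, r1, r2, r3⟩
    · left; exact ⟨row' :: rest, by simp [invLoopA, r1], by simp [stackInv, r2]⟩
    · have hnostack := rowLoopA_inr_nostack Nitem q row none r1
      have hall : ∀ x ∈ row,
          (fun t => !decide (2 ≤ t.length ∧ t.getD 0 0 = Nitem ∧ t.getD 1 0 < 64)) x = true := by
        intro x hx
        simp only [Bool.not_eq_true', decide_eq_false_iff_not]
        intro hh
        exact hnostack x hx ⟨by simpa using hh.2.1, by simpa using hh.2.2⟩
      have hrest := ih (fun s hs => h s (by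
        rw [List.flatten_cons, takeWhile_append_all _ _ _ hall]
        exact List.mem_append_right _ hs))
      rcases hrest with ⟨inv', h1, h2⟩ | ⟨h1, h2, h3⟩ | ⟨r, c, h1, h2, h3⟩
      · left; exact ⟨row :: inv', by simp [invLoopA, r1, h1], by simp [stackInv, r2, h2]⟩
      · right; left
        exact ⟨by simp [invLoopA, r1, h1], by simp [stackInv, r2, h2],
               by simp [placeInv, r3, h3]⟩
      · right; right
        exact ⟨r + 1, c, by simp [invLoopA, r1, h1], by simp [stackInv, r2, h2],
               by simp [placeInv, r3, h3]⟩
    · have hnostack := rowLoopA_inr_nostack Nitem q row (some j) r1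
      have hall : ∀ x ∈ row,
          (fun t => !decide (2 ≤ t.length ∧ t.getD 0 0 = Nitem ∧ t.getD 1 0 < 64)) x = true := by
        intro x hx
        simp only [Bool.not_eq_true', decide_eq_false_iff_not]
        intro hh
        exact hnostack x hx ⟨by simpa using hh.2.1, by simpa using hh.2.2⟩
      have hrest := ih (fun s hs => h s (by
        rw [List.flatten_cons, takeWhile_append_all _ _ _ hall]
        exact List.mem_append_right _ hs))
      rcases hrest with ⟨inv', h1, h2⟩ | ⟨h1, h2, h3⟩ | ⟨r, c, h1, h2, h3⟩
      · left; exact ⟨row :: inv', by simp [invLoopA, r1, h1], by simp [stackInv, r2, h2]⟩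
      · right; right
        exact ⟨0, j, by simp [invLoopA, r1, h1], by simp [stackInv, r2, h2],
               by simp [placeInv, r3]⟩
      · right; right
        exact ⟨0, j, by simp [invLoopA, r1, h1], by simp [stackInv, r2, h2],
               by simp [placeInv, r3]⟩

-- ===== VERDICT (by name: the statement is the Claim_ definition above) =====
theorem give_item_spec : Claim_equal_give_item := by
  intro inventory hotbar Nitem quantity _ hpre
  unfold Spec_give_item give_item give_item_alt
  obtain ⟨hsafe, hdisj⟩ := hpre
  rcases hb_rel Nitem quantity hotbar hsafe with
    ⟨hb', a1, b1⟩ | ⟨a1, b1, c1⟩ | ⟨i, a1, b1, c1⟩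
  · simp [a1, b1]
  · have hnostack := hbLoopA_inr_nostack quantity hotbar none a1
    have hinvsafe : ∀ s ∈ inventory.flatten.takeWhile
        (fun t => !decide (2 ≤ t.length ∧ t.getD 0 0 = Nitem ∧ t.getD 1 0 < 64)),
        1 ≤ s.length ∧ (s.getD 0 0 = Nitem → 2 ≤ s.length) := by
      rcases hdisj with ⟨s, hs, _, hlt⟩ | hok
      · exact absurd (by simpa using hlt) (hnostack s hs)
      · exact hok
    rcases inv_rel Nitem quantity inventory hinvsafe with
      ⟨inv', a2, b2⟩ | ⟨a2, b2, c2⟩ | ⟨r, c, a2, b2, c2⟩ <;>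
      simp [a1, b1, a2, b2] <;> simp_all
  · have hnostack := hbLoopA_inr_nostack quantity hotbar (some i) a1
    have hinvsafe : ∀ s ∈ inventory.flatten.takeWhile
        (fun t => !decide (2 ≤ t.length ∧ t.getD 0 0 = Nitem ∧ t.getD 1 0 < 64)),
        1 ≤ s.length ∧ (s.getD 0 0 = Nitem → 2 ≤ s.length) := by
      rcases hdisj with ⟨s, hs, _, hlt⟩ | hok
      · exact absurd (by simpa using hlt) (hnostack s hs)
      · exact hok
    rcases inv_rel Nitem quantity inventory hinvsafe with
      ⟨inv', a2, b2⟩ | ⟨a2, b2, c2⟩ | ⟨r, c, a2, b2, c2⟩ <;>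
      simp [a1, b1, a2, b2] <;> simp_all
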